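-- pv_equiv track=rewrite | github.com/codesquad-backend-study/daily-algorithm-challenge | Sully/baekjoon/B10610.py | solution
-- ===== SOURCE A (Python) =====
-- def solution(n: int) -> int:
--     # 숫자니까 반대로 정렬 (어차피 숫자로 인식하니 int()를 해줄 필요 없음)
--     nums = sorted(list(str(n)), reverse=True)
--
--     # (number % 30 == 0) == True
--     # answer = max(answer, int(tmp))
--     # 위 두가지 조건을 기억하면서 풀어 보자
--
--     s_number = ''
--     for num in nums:
--         s_number += num
--
--     # https://ko.wikipedia.org/wiki/%EB%B0%B0%EC%88%98_%ED%8C%90%EC%A0%95%EB%B2%95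
--     number = int(s_number)
--     if number % 30 == 0:
--         return number
--
--     return -1
-- ===== SOURCE B (Python) =====
-- def solution(n: int) -> int:
--     # Counting sort: tally each digit of str(n) (int(ch) raises ValueError on '-'
--     # exactly as A's int() does for negative n), then emit digits 9 -> 0.
--     counts = [0] * 10
--     for ch in str(n):
--         counts[int(ch)] += 1
--     digits = ''.join(str(d) * counts[d] for d in range(9, -1, -1))
--     number = int(digits)
--     if number % 30 == 0:
--         return number
--     return -1
-- ===== Notes on version B (the rewrite author's own statement) =====
-- stated objective: alternative
-- what changed: Replaces the reverse comparison sort of the digit characters plus the string-accumulation loop with a digit frequency table built in one pass and bucket emission from the highest digit down to the lowest (counting sort), keeping the same final divisibility test.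
import Mathlib
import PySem

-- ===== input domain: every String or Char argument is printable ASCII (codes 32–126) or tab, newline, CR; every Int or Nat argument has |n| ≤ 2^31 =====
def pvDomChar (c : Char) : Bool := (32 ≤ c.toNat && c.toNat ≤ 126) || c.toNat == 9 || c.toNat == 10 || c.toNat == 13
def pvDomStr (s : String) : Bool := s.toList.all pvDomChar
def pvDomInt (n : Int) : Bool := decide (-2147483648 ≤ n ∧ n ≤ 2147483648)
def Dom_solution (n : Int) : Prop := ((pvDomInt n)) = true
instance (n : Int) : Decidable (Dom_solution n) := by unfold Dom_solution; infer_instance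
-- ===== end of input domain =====

-- B replaces A's reverse comparison sort + string-accumulation loop with a digit
-- frequency table and highest-to-lowest bucket emission (counting sort); objective: alternative.

-- ===== PORT A =====
def solution (n : Int) : Int :=
  -- nums = sorted(list(str(n)), reverse=True)
  let nums : List Char := PySem.List.sorted (PySem.Int.toStr n).toList (fun c => c) true
  -- s_number = ''; for num in nums: s_number += num
  let s_number : List Char := nums.foldl (fun s c => s ++ [c]) []
  -- number = int(s_number)  -- ValueError (negative n puts '-' last) excluded by Pre_
  let number : Int := (PySem.Int.ofChars? s_number).getD 0
  if PySem.Int.mod number 30 == 0 then number else -1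

-- ===== PORT B =====
-- Python's  s * k  on a string (exact: a non-positive count gives '')
def strMul (cs : List Char) (k : Int) : List Char := (List.replicate k.toNat cs).flatten

def solution_alt (n : Int) : Int :=
  -- counts = [0] * 10
  let counts0 : List Int := List.replicate 10 0
  -- for ch in str(n): counts[int(ch)] += 1   -- int('-') ValueError excluded by Pre_
  let counts : List Int := (PySem.Int.toStr n).toList.foldl
    (fun cs ch =>
      let d : Int := (PySem.Int.ofChars? [ch]).getD 0
      PySem.List.pySetD cs d (PySem.List.pyGetD cs d 0 + 1)) counts0
  -- digits = ''.join(str(d) * counts[d] for d in range(9, -1, -1))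
  let digits : List Char := PySem.Chars.join []
    ((PySem.List.pyRange 9 (-1) (-1)).map
      (fun d => strMul (PySem.Int.toChars d) (PySem.List.pyGetD counts d 0)))
  -- number = int(digits)
  let number : Int := (PySem.Int.ofChars? digits).getD 0
  if PySem.Int.mod number 30 == 0 then number else -1

-- ===== PRECONDITION & SPEC =====
-- Pre_ excludes negative n, on which BOTH Pythons raise ValueError (A: int("…-"), B: int('-')).
def Pre_solution (n : Int) : Prop := 0 ≤ n
instance (n : Int) : Decidable (Pre_solution n) := by unfold Pre_solution; infer_instance
def pvWitness_solution : Int := 6990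

def Spec_solution (n : Int) (out : Int) : Prop := out = solution_alt n
instance (n : Int) (out : Int) : Decidable (Spec_solution n out) := by unfold Spec_solution; infer_instance

-- ===== CLAIM (what is proved, stated in full; the proofs are below) =====
def Claim_equal_solution : Prop := ∀ (n : Int), Dom_solution n → Pre_solution n → Spec_solution n (solution n)

-- ===== LEMMAS AND PROOFS =====

-- the character of a decimal digit
def dchar (d : Nat) : Char := Char.ofNat (48 + d)

-- B's bucket emission, digit d down to digit 0
def emis (cnt : Nat → Nat) : Nat → List Char
  | 0 => List.replicate (cnt 0) (dchar 0)
  | (d+1) => List.replicate (cnt (d+1)) (dchar (d+1)) ++ emis cnt d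

lemma dig_digitChar (k : Nat) (h : k < 10) :
    48 ≤ (Nat.digitChar k).toNat ∧ (Nat.digitChar k).toNat ≤ 57 := by
  interval_cases k <;> decide

-- every character Nat.toDigits 10 emits is a decimal digit character
lemma toDigitsCore_digits (fuel m : Nat) (ds : List Char)
    (h : ∀ c ∈ ds, 48 ≤ c.toNat ∧ c.toNat ≤ 57) :
    ∀ c ∈ Nat.toDigitsCore 10 fuel m ds, 48 ≤ c.toNat ∧ c.toNat ≤ 57 := by
  induction fuel generalizing m ds with
  | zero => simpa [Nat.toDigitsCore] using h
  | succ f ih =>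
    rw [Nat.toDigitsCore]
    split
    · intro c hc
      rcases List.mem_cons.mp hc with rfl | hc
      · exact dig_digitChar _ (Nat.mod_lt _ (by omega))
      · exact h c hc
    · apply ih
      intro c hc
      rcases List.mem_cons.mp hc with rfl | hc
      · exact dig_digitChar _ (Nat.mod_lt _ (by omega))
      · exact h c hc

lemma toStr_digits (n : Int) (hn : 0 ≤ n) :
    ∀ c ∈ (PySem.Int.toStr n).toList, 48 ≤ c.toNat ∧ c.toNat ≤ 57 := by
  rw [PySem.Int.toList_toStr]
  unfold PySem.Int.toChars
  rw [if_neg (by omega)]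
  exact toDigitsCore_digits _ _ _ (by simp)

-- int(ch) for a single digit character
lemma int_single_digit (c : Char) (h1 : 48 ≤ c.toNat) (h2 : c.toNat ≤ 57) :
    (PySem.Int.ofChars? [c]).getD 0 = (c.toNat : Int) - 48 := by
  have hc := Char.ofNat_toNat c
  interval_cases h : c.toNat <;> subst hc <;> decide

lemma dchar_toNat (d : Nat) (hd : d < 10) : (dchar d).toNat = 48 + d := by
  unfold dchar
  rw [Char.toNat_ofNat, if_pos]
  exact Or.inl (by omega)

lemma eq_dchar_iff (c : Char) (d : Nat) (hd : d < 10) : c = dchar d ↔ c.toNat = 48 + d := by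
  constructor
  · rintro rfl; exact dchar_toNat d hd
  · intro h
    have hc := Char.ofNat_toNat c
    rw [h] at hc
    exact hc.symm

-- the counting fold, characterised
lemma counts_fold (ds : List Char) (hd : ∀ c ∈ ds, 48 ≤ c.toNat ∧ c.toNat ≤ 57)
    (cs : List Int) (hlen : cs.length = 10) :
    ds.foldl (fun cs ch =>
        let d : Int := (PySem.Int.ofChars? [ch]).getD 0
        PySem.List.pySetD cs d (PySem.List.pyGetD cs d 0 + 1)) cs
      = (List.range 10).map (fun d => cs.getD d 0 + (ds.count (dchar d) : Int)) := by
  induction ds generalizing cs with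
  | nil =>
    simp only [List.foldl_nil, List.count_nil, Nat.cast_zero, add_zero]
    apply List.ext_getElem (by simp [hlen])
    intro i hi _
    simp only [List.getElem_map, List.getElem_range]
    rw [List.getD_eq_getElem cs 0 (by omega)]
  | cons c t ih =>
    obtain ⟨h1, h2⟩ := hd c (List.mem_cons_self ..)
    have hdt : ∀ x ∈ t, 48 ≤ x.toNat ∧ x.toNat ≤ 57 := fun x hx => hd x (List.mem_cons_of_mem _ hx)
    rw [List.foldl_cons]
    simp only [int_single_digit c h1 h2]
    rw [PySem.List.pySetD_of_nonneg _ _ (by omega),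
        PySem.List.pyGetD_eq_getElem _ _ (by omega) (by rw [hlen]; omega)]
    rw [ih hdt _ (by simp [hlen])]
    apply List.map_congr_left
    intro d hdm
    have hd10 : d < 10 := List.mem_range.mp hdm
    have hv : ((c.toNat : Int) - 48).toNat = c.toNat - 48 := by omega
    rw [List.count_cons]
    rw [List.getD_eq_getElem _ 0 (by simp [hlen]; omega)]
    rw [List.getElem_set]
    by_cases he : c = dchar d
    · have : c.toNat = 48 + d := (eq_dchar_iff c d hd10).mp he
      rw [if_pos (by omega), if_pos (by exact beq_iff_eq.mpr he)]
      rw [List.getD_eq_getElem _ 0 (by omega)]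
      have : ((c.toNat : Int) - 48).toNat = d := by omega
      simp only [this]
      push_cast
      ring
    · have : ¬ c.toNat = 48 + d := fun h => he ((eq_dchar_iff c d hd10).mpr h)
      rw [if_neg (by omega), if_neg (by exact fun h => he (beq_iff_eq.mp h))]
      rw [List.getD_eq_getElem _ 0 (by omega)]
      simp

lemma char_le_of_toNat_le (a b : Char) (h : a.toNat ≤ b.toNat) : a ≤ b :=
  Char.le_def.mpr h

lemma mem_emis_toNat (cnt : Nat → Nat) (d : Nat) (hd : d < 10) :
    ∀ x ∈ emis cnt d, 48 ≤ x.toNat ∧ x.toNat ≤ 48 + d := by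
  induction d with
  | zero =>
    intro x hx
    rw [show emis cnt 0 = List.replicate (cnt 0) (dchar 0) from rfl] at hx
    rw [List.eq_of_mem_replicate hx, dchar_toNat 0 (by omega)]; omega
  | succ k ih =>
    intro x hx
    rw [show emis cnt (k+1) = List.replicate (cnt (k+1)) (dchar (k+1)) ++ emis cnt k from rfl] at hx
    rcases List.mem_append.mp hx with hx | hx
    · rw [List.eq_of_mem_replicate hx, dchar_toNat (k+1) hd]; omega
    · have := ih (by omega) x hx; omega

lemma pairwise_emis (cnt : Nat → Nat) (d : Nat) (hd : d < 10) :
    List.Pairwise (fun a b => b ≤ a) (emis cnt d) := by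
  induction d with
  | zero => exact List.pairwise_replicate.mpr (Or.inr (le_refl _))
  | succ k ih =>
    rw [show emis cnt (k+1) = List.replicate (cnt (k+1)) (dchar (k+1)) ++ emis cnt k from rfl]
    rw [List.pairwise_append]
    refine ⟨List.pairwise_replicate.mpr (Or.inr (le_refl _)), ih (by omega), ?_⟩
    intro a ha b hb
    rw [List.eq_of_mem_replicate ha]
    have hb' := mem_emis_toNat cnt k (by omega) b hb
    apply char_le_of_toNat_le
    rw [dchar_toNat (k+1) hd]
    omega

lemma count_emis_dchar (cnt : Nat → Nat) (d k : Nat) (hd : d < 10) (hk : k ≤ d) :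
    (emis cnt d).count (dchar k) = cnt k := by
  induction d with
  | zero =>
    interval_cases k
    rw [show emis cnt 0 = List.replicate (cnt 0) (dchar 0) from rfl,
        List.count_replicate, if_pos (by simp)]
  | succ j ih =>
    rw [show emis cnt (j+1) = List.replicate (cnt (j+1)) (dchar (j+1)) ++ emis cnt j from rfl,
        List.count_append, List.count_replicate]
    rcases Nat.lt_or_ge k (j+1) with h | h
    · rw [if_neg, ih (by omega) (by omega)]
      · omega
      · intro hcontra
        have := (eq_dchar_iff _ (j+1) hd).mp (beq_iff_eq.mp hcontra).symm
        rw [dchar_toNat k (by omega)] at this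
        omega
    · have hkj : k = j + 1 := by omega
      subst hkj
      rw [if_pos (by simp)]
      have : (emis cnt j).count (dchar (j+1)) = 0 := by
        rw [List.count_eq_zero]
        intro hmem
        have := mem_emis_toNat cnt j (by omega) _ hmem
        rw [dchar_toNat (j+1) hd] at this
        omega
      omega

lemma count_emis_nondigit (cnt : Nat → Nat) (d : Nat) (hd : d < 10) (x : Char)
    (hx : ¬ (48 ≤ x.toNat ∧ x.toNat ≤ 48 + d)) :
    (emis cnt d).count x = 0 := by
  rw [List.count_eq_zero]
  intro hmem
  exact hx (mem_emis_toNat cnt d hd x hmem)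

lemma emis_perm (ds : List Char) (hd : ∀ c ∈ ds, 48 ≤ c.toNat ∧ c.toNat ≤ 57) :
    (emis (fun k => ds.count (dchar k)) 9).Perm ds := by
  rw [List.perm_iff_count]
  intro x
  by_cases hx : 48 ≤ x.toNat ∧ x.toNat ≤ 57
  · have hk : x = dchar (x.toNat - 48) := (eq_dchar_iff x _ (by omega)).mpr (by omega)
    rw [hk, count_emis_dchar _ 9 _ (by omega) (by omega)]
  · rw [count_emis_nondigit _ 9 (by omega) x (by omega)]
    rw [eq_comm, List.count_eq_zero]
    intro hmem
    exact hx (hd x hmem)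

-- reverse-sorting a list of digit characters gives exactly the bucket emission
lemma sorted_rev_eq_emis (ds : List Char) (hd : ∀ c ∈ ds, 48 ≤ c.toNat ∧ c.toNat ≤ 57) :
    PySem.List.sorted ds (fun c => c) true = emis (fun k => ds.count (dchar k)) 9 := by
  apply List.Perm.eq_of_pairwise (le := fun a b => b ≤ a)
  · intro a b _ _ h1 h2; exact le_antisymm h2 h1
  · exact PySem.List.sorted_pairwise_rev ds (fun c => c)
  · exact pairwise_emis _ 9 (by omega)
  · exact ((PySem.List.sorted_perm ds (fun c => c) true).trans (emis_perm ds hd).symm)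

lemma strMul_single (c : Char) (k : Nat) : strMul [c] (k : Int) = List.replicate k c := by
  unfold strMul
  rw [Int.toNat_natCast, List.flatten_replicate_singleton]

-- B's join/range/str(d)*counts[d] expression, reduced to the emission function
lemma lhs_eq_emis (ds : List Char) :
    PySem.Chars.join []
      ((PySem.List.pyRange 9 (-1) (-1)).map
        (fun d => strMul (PySem.Int.toChars d)
          (PySem.List.pyGetD ((List.range 10).map (fun d => (ds.count (dchar d) : Int))) d 0)))
      = emis (fun k => ds.count (dchar k)) 9 := by
  rw [show PySem.List.pyRange 9 (-1) (-1) = [9,8,7,6,5,4,3,2,1,0] from by decide]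
  rw [show List.range 10 = [0,1,2,3,4,5,6,7,8,9] from by decide]
  simp only [List.map_cons, List.map_nil, PySem.List.pyGetD_ofNat']
  simp only [List.getD_cons_succ, List.getD_cons_zero]
  rw [show PySem.Int.toChars 9 = ['9'] from by decide, show PySem.Int.toChars 8 = ['8'] from by decide,
      show PySem.Int.toChars 7 = ['7'] from by decide, show PySem.Int.toChars 6 = ['6'] from by decide,
      show PySem.Int.toChars 5 = ['5'] from by decide, show PySem.Int.toChars 4 = ['4'] from by decide,
      show PySem.Int.toChars 3 = ['3'] from by decide, show PySem.Int.toChars 2 = ['2'] from by decide,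
      show PySem.Int.toChars 1 = ['1'] from by decide, show PySem.Int.toChars 0 = ['0'] from by decide]
  simp only [strMul_single]
  show List.intercalate [] _ = _
  simp only [List.intercalate, List.intersperse, List.flatten]
  show _ = emis _ 9
  simp only [show ∀ cnt : Nat → Nat, emis cnt 9 =
      List.replicate (cnt 9) (dchar 9) ++ (List.replicate (cnt 8) (dchar 8) ++
      (List.replicate (cnt 7) (dchar 7) ++ (List.replicate (cnt 6) (dchar 6) ++
      (List.replicate (cnt 5) (dchar 5) ++ (List.replicate (cnt 4) (dchar 4) ++
      (List.replicate (cnt 3) (dchar 3) ++ (List.replicate (cnt 2) (dchar 2) ++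
      (List.replicate (cnt 1) (dchar 1) ++ List.replicate (cnt 0) (dchar 0)))))))))
    from fun _ => rfl]
  rw [show dchar 9 = '9' from by decide, show dchar 8 = '8' from by decide,
      show dchar 7 = '7' from by decide, show dchar 6 = '6' from by decide,
      show dchar 5 = '5' from by decide, show dchar 4 = '4' from by decide,
      show dchar 3 = '3' from by decide, show dchar 2 = '2' from by decide,
      show dchar 1 = '1' from by decide, show dchar 0 = '0' from by decide]
  simp

-- the emitted bucket string equals the reverse-sorted digit string
lemma emission_eq_sorted (ds : List Char) (hd : ∀ c ∈ ds, 48 ≤ c.toNat ∧ c.toNat ≤ 57) :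
    PySem.Chars.join []
      ((PySem.List.pyRange 9 (-1) (-1)).map
        (fun d => strMul (PySem.Int.toChars d)
          (PySem.List.pyGetD ((List.range 10).map (fun d => (ds.count (dchar d) : Int))) d 0)))
      = PySem.List.sorted ds (fun c => c) true :=
  (lhs_eq_emis ds).trans (sorted_rev_eq_emis ds hd).symm

-- ===== VERDICT (by name: the statement is the Claim_ definition above) =====
theorem solution_spec : Claim_equal_solution := by
  intro n _ hpre
  unfold Spec_solution solution solution_alt
  simp only []
  rw [counts_fold _ (toStr_digits n hpre) _ (by simp)]
  have hz : ∀ d : Nat, (List.replicate 10 (0:Int)).getD d 0 + ((PySem.Int.toStr n).toList.count (dchar d) : Int)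
      = ((PySem.Int.toStr n).toList.count (dchar d) : Int) := by
    intro d
    by_cases h : d < 10 <;> simp [List.getD, h]
    interval_cases d <;> rfl
  simp only [hz]
  rw [emission_eq_sorted _ (toStr_digits n hpre)]
  simp only [PySem.List.foldl_append_singleton, List.nil_append]
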